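-- pv_equiv track=rewrite | github.com/viktormurashov/test | 198/ANovikov/lab3.py | min_deletions_to_PSP
-- ===== SOURCE A (Python) =====
-- def min_deletions_to_PSP(s):
--     open_count = 0
--     deletions = 0
--     for ch in s:
--         if ch == '(':
--             open_count += 1
--         else:  # ch == ')'
--             if open_count > 0:
--                 open_count -= 1
--             else:
--                 deletions += 1
--     deletions += open_count
--     return deletions
-- ===== SOURCE B (Python) =====
-- def min_deletions_to_PSP(s):
--     # Two independent one-directional counts: unmatched closers (left-to-right)
--     # plus unmatched openers (right-to-left). Any non-'(' char acts as ')'.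
--     unmatched_close = 0
--     bal = 0
--     for ch in s:
--         if ch != '(':
--             if bal == 0:
--                 unmatched_close += 1
--             else:
--                 bal -= 1
--         else:
--             bal += 1
--     unmatched_open = 0
--     pending = 0
--     for ch in reversed(s):
--         if ch != '(':
--             pending += 1
--         elif pending > 0:
--             pending -= 1
--         else:
--             unmatched_open += 1
--     return unmatched_close + unmatched_open
-- ===== Notes on version B (the rewrite author's own statement) =====
-- stated objective: alternative
-- what changed: Replaces A's single stateful pass (open-balance plus deletion counter, summed at the end) by two independent directional counts: unmatched closers via a left-to-right balance pass and unmatched openers via a right-to-left pass, returning their sum.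
import Mathlib
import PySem

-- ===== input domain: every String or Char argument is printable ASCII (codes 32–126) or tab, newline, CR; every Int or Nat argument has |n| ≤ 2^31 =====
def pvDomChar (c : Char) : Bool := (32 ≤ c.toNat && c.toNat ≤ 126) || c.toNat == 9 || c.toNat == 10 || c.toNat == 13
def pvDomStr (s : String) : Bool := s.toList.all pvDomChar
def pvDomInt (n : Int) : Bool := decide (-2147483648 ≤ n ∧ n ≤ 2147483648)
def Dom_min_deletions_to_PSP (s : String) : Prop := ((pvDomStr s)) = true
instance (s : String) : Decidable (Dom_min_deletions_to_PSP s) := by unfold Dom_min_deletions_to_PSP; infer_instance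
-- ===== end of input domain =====

-- B replaces A's single stateful pass by two independent directional counts
-- (unmatched closers left-to-right, unmatched openers right-to-left); same cost,
-- alternative decomposition. Equivalence proved on all inputs.

-- ===== PORT A =====
-- A's loop state: (open_count, deletions)
def stepA (st : Int × Int) (ch : Char) : Int × Int :=
  if ch = '(' then (st.1 + 1, st.2)
  else if st.1 > 0 then (st.1 - 1, st.2) else (st.1, st.2 + 1)

def min_deletions_to_PSP (s : String) : Int :=
  let st := s.toList.foldl stepA (0, 0)
  st.2 + st.1

-- ===== PORT B =====
-- pass 1 state: (bal, unmatched_close) — branch order as in Source B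
def stepClose (st : Int × Int) (ch : Char) : Int × Int :=
  if ch ≠ '(' then (if st.1 = 0 then (st.1, st.2 + 1) else (st.1 - 1, st.2))
  else (st.1 + 1, st.2)

-- pass 2 state: (pending, unmatched_open), run over the reversed string
def stepOpen (st : Int × Int) (ch : Char) : Int × Int :=
  if ch ≠ '(' then (st.1 + 1, st.2)
  else if st.1 > 0 then (st.1 - 1, st.2) else (st.1, st.2 + 1)

def min_deletions_to_PSP_alt (s : String) : Int :=
  (s.toList.foldl stepClose (0, 0)).2 + (s.toList.reverse.foldl stepOpen (0, 0)).2

-- ===== PRECONDITION & SPEC =====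
def Spec_min_deletions_to_PSP (s : String) (out : Int) : Prop := out = min_deletions_to_PSP_alt s
instance (s : String) (out : Int) : Decidable (Spec_min_deletions_to_PSP s out) := by unfold Spec_min_deletions_to_PSP; infer_instance

-- ===== CLAIM (what is proved, stated in full; the proofs are below) =====
def Claim_equal_min_deletions_to_PSP : Prop := ∀ (s : String), Dom_min_deletions_to_PSP s → Spec_min_deletions_to_PSP s (min_deletions_to_PSP s)

-- ===== LEMMAS AND PROOFS =====

-- step rewrites for A's step (kept folded inside foldl)
theorem stepA_open (o d : Int) (ch : Char) (h : ch = '(') : stepA (o, d) ch = (o + 1, d) := by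
  simp [stepA, h]

theorem stepA_pos (o d : Int) (ch : Char) (h : ch ≠ '(') (ho : 0 < o) :
    stepA (o, d) ch = (o - 1, d) := by
  simp [stepA, h, ho]

theorem stepA_zero (o d : Int) (ch : Char) (h : ch ≠ '(') (ho : ¬ 0 < o) :
    stepA (o, d) ch = (o, d + 1) := by
  simp [stepA, h, ho]

-- B's pass-1 fold computes the same state as A's fold on nonnegative balances
theorem foldClose_eq_foldA (l : List Char) (o d : Int) (ho : 0 ≤ o) :
    l.foldl stepClose (o, d) = l.foldl stepA (o, d) := by
  induction l generalizing o d with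
  | nil => rfl
  | cons ch t ih =>
    rw [List.foldl_cons, List.foldl_cons]
    by_cases h : ch = '('
    · rw [stepA_open o d ch h, show stepClose (o, d) ch = (o + 1, d) by simp [stepClose, h]]
      exact ih _ _ (by omega)
    · by_cases h0 : o = 0
      · rw [show stepClose (o, d) ch = (o, d + 1) by simp [stepClose, h, h0],
            stepA_zero o d ch h (by omega)]
        exact ih _ _ ho
      · rw [show stepClose (o, d) ch = (o - 1, d) by simp [stepClose, h, h0],
            stepA_pos o d ch h (by omega)]
        exact ih _ _ (by omega)

-- nonnegativity of A's fold state
theorem foldA_nonneg (l : List Char) (o d : Int) (ho : 0 ≤ o) (hd : 0 ≤ d) :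
    0 ≤ (l.foldl stepA (o, d)).1 ∧ 0 ≤ (l.foldl stepA (o, d)).2 := by
  induction l generalizing o d with
  | nil => exact ⟨ho, hd⟩
  | cons ch t ih =>
    rw [List.foldl_cons]
    by_cases h : ch = '('
    · rw [stepA_open o d ch h]; exact ih _ _ (by omega) hd
    · by_cases hp : 0 < o
      · rw [stepA_pos o d ch h hp]; exact ih _ _ (by omega) hd
      · rw [stepA_zero o d ch h hp]; exact ih _ _ ho (by omega)

-- the deletions component is additive in its initial value
theorem foldA_add_d (l : List Char) (o d : Int) :
    l.foldl stepA (o, d) = ((l.foldl stepA (o, 0)).1, d + (l.foldl stepA (o, 0)).2) := by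
  induction l generalizing o d with
  | nil => simp
  | cons ch t ih =>
    rw [List.foldl_cons, List.foldl_cons]
    by_cases h : ch = '('
    · rw [stepA_open o d ch h, stepA_open o 0 ch h]; exact ih _ _
    · by_cases hp : 0 < o
      · rw [stepA_pos o d ch h hp, stepA_pos o 0 ch h hp]; exact ih _ _
      · rw [stepA_zero o d ch h hp, stepA_zero o 0 ch h hp, ih (o := o) (d := d + 1),
            ih (o := o) (d := 0 + 1)]
        norm_num
        ring

-- effect of one extra initial open paren on A's fold
theorem foldA_succ (l : List Char) (o : Int) (ho : 0 ≤ o) :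
    l.foldl stepA (o + 1, 0) =
      (if 0 < (l.foldl stepA (o, 0)).2
       then ((l.foldl stepA (o, 0)).1, (l.foldl stepA (o, 0)).2 - 1)
       else ((l.foldl stepA (o, 0)).1 + 1, (l.foldl stepA (o, 0)).2)) := by
  induction l generalizing o with
  | nil => simp
  | cons ch t ih =>
    rw [List.foldl_cons, List.foldl_cons]
    by_cases h : ch = '('
    · rw [stepA_open (o + 1) 0 ch h, stepA_open o 0 ch h]
      exact ih (o + 1) (by omega)
    · by_cases h0 : o = 0
      · subst h0
        rw [stepA_pos (0 + 1) 0 ch h (by omega), stepA_zero 0 0 ch h (by omega)]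
        norm_num
        rw [foldA_add_d t 0 1]
        have := (foldA_nonneg t 0 0 le_rfl le_rfl).2
        split_ifs with hcond
        · refine Prod.ext rfl ?_
          simp only
          omega
        · omega
      · rw [stepA_pos (o + 1) 0 ch h (by omega), stepA_pos o 0 ch h (by omega)]
        rw [show o + 1 - 1 = (o - 1) + 1 by omega, ih (o - 1) (by omega)]

-- main symmetry: the reverse pass with stepOpen computes A's state swapped
theorem reverse_foldOpen (l : List Char) :
    l.reverse.foldl stepOpen (0, 0) = ((l.foldl stepA (0, 0)).2, (l.foldl stepA (0, 0)).1) := by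
  induction l with
  | nil => rfl
  | cons ch t ih =>
    have hd := (foldA_nonneg t 0 0 le_rfl le_rfl).2
    rw [List.reverse_cons, List.foldl_append, ih, List.foldl_cons, List.foldl_nil,
        List.foldl_cons]
    by_cases h : ch = '('
    · rw [stepA_open 0 0 ch h, show (0:Int) + 1 = 0 + 1 from rfl, foldA_succ t 0 le_rfl]
      by_cases hc : 0 < (t.foldl stepA (0, 0)).2
      · rw [if_pos hc]
        simp [stepOpen, h, hc]
      · rw [if_neg hc]
        simp [stepOpen, h, hc]
    · rw [stepA_zero 0 0 ch h (by omega), foldA_add_d t 0 (0 + 1)]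
      simp [stepOpen, h, add_comm]
-- ===== VERDICT (by name: the statement is the Claim_ definition above) =====
theorem min_deletions_to_PSP_spec : Claim_equal_min_deletions_to_PSP := by
  intro s _
  unfold Spec_min_deletions_to_PSP min_deletions_to_PSP min_deletions_to_PSP_alt
  rw [foldClose_eq_foldA s.toList 0 0 le_rfl, reverse_foldOpen]
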